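-- pv_equiv track=rewrite | github.com/pravula24/EBEC-Python-Projects | file-analysis.py | toLibrary
-- ===== SOURCE A (Python) =====
-- from string import punctuation
--
-- def toLibrary(list):
--     temp = []
--     for i in range(len(list)):
--         for j in range(len(list[i])):
--             list[i][j] = list[i][j].lower().strip(punctuation)
--             temp.append(list[i][j])
--     temp = sorted(set(temp))
--     counts = [0] * len(temp)
--     for i in range(len(temp)):
--         c = 0
--         for j in range(len(list)):
--             for k in range(len(list[j])):
--                 if(list[j][k] == temp[i]):
--                     c += 1
--         counts[i] = c
--
--     return dict(zip(temp, counts))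
-- ===== SOURCE B (Python) =====
-- from string import punctuation
-- from itertools import groupby
--
-- def toLibrary(list):
--     temp = []
--     for i in range(len(list)):
--         for j in range(len(list[i])):
--             list[i][j] = list[i][j].lower().strip(punctuation)
--             temp.append(list[i][j])
--     return {word: len([*group]) for word, group in groupby(sorted(temp))}
-- ===== Notes on version B (the rewrite author's own statement) =====
-- stated objective: faster
-- what changed: A rescans the entire nested list once per unique word to count it; B sorts the flat normalized word list once and counts each word's run in a single groupby pass.
import Mathlib
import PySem

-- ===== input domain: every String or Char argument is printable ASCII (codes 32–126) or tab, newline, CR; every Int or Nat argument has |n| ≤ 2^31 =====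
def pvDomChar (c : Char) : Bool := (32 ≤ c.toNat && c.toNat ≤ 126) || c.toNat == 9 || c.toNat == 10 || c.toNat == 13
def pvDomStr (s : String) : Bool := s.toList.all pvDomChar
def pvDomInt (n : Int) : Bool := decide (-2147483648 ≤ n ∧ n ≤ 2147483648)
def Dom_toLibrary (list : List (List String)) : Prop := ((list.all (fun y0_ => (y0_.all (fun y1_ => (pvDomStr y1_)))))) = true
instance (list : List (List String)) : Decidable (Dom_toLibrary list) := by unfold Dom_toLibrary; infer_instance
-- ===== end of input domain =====

-- B replaces A's per-unique-word rescan of the whole nested list by one sorted pass with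
-- groupby run counting. Both Pythons mutate the input nested list in place identically;
-- the equivalence proved here is about the RETURN value.

-- string.punctuation
def pvPunct : String := "!\"#$%&'()*+,-./:;<=>?@[\\]^_`{|}~"

-- word.lower().strip(punctuation)
def pvNorm (s : String) : String := PySem.Str.stripChars (PySem.Str.lower s) pvPunct

-- ===== PORT A =====
def toLibrary (list : List (List String)) : List (String × Int) :=
  -- nested index loop: list[i][j] = normalized word; temp.append(list[i][j])
  let list2 := list.map (fun row => row.map pvNorm)
  let temp := list2.foldl (fun acc row => acc ++ row) []
  -- temp = sorted(set(temp))
  let temp2 := PySem.List.sorted (PySem.Set.ofList temp) (fun x => x) false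
  -- counts[i] = triple nested rescan of the (mutated) list
  let counts := temp2.map (fun t =>
    list2.foldl (fun c row => row.foldl (fun c w => if w == t then c + 1 else c) c) (0 : Int))
  -- dict(zip(temp, counts))
  (PySem.Dict.ofList (temp2.zip counts)).items

-- ===== PORT B =====
-- itertools.groupby on a sorted list: one run of equal words per distinct word
def pvGroup : List String → List (String × Int)
  | [] => []
  | x :: xs =>
    (x, ((xs.takeWhile (· == x)).length + 1 : Int)) :: pvGroup (xs.dropWhile (· == x))
  termination_by l => l.length
  decreasing_by
    simpa using Nat.lt_succ_of_le (List.length_dropWhile_le _ _)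

def toLibrary_alt (list : List (List String)) : List (String × Int) :=
  let temp := list.foldl (fun acc row => acc ++ row.map pvNorm) []
  pvGroup (PySem.List.sorted temp (fun x => x) false)

-- ===== PRECONDITION & SPEC =====
def Spec_toLibrary (list : List (List String)) (out : List (String × Int)) : Prop := out = toLibrary_alt list
instance (list : List (List String)) (out : List (String × Int)) : Decidable (Spec_toLibrary list out) := by unfold Spec_toLibrary; infer_instance

-- ===== CLAIM (what is proved, stated in full; the proofs are below) =====
def Claim_equal_toLibrary : Prop := ∀ (list : List (List String)), Dom_toLibrary list → Spec_toLibrary list (toLibrary list)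

-- ===== LEMMAS AND PROOFS =====

-- A's nested counting loop counts occurrences in the flattened (normalized) list
theorem pv_count_loop2 (ls : List (List String)) (t : String) (a : Int) :
    ls.foldl (fun c row => c + (row.count t : Int)) a = a + ((ls.flatMap id).count t : Int) := by
  induction ls generalizing a with
  | nil => simp
  | cons row rs ih => simp [ih, List.count_append]; ring

theorem pv_count_loop (ls : List (List String)) (t : String) (a : Int) :
    ls.foldl (fun c row => row.foldl (fun c w => if w == t then c + 1 else c) c) a
      = a + ((ls.flatMap id).count t : Int) := by
  simp only [PySem.List.foldl_beq_add_one]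
  exact pv_count_loop2 ls t a

-- pvGroup of a ≤-sorted list: one pair per distinct word, with its multiplicity
theorem pv_group_aux (n : Nat) : ∀ (S : List String), S.length ≤ n → S.Pairwise (· ≤ ·) →
    pvGroup S = (PySem.List.sorted (PySem.Set.ofList S) (fun x => x) false).map
      (fun w => (w, (S.count w : Int))) := by
  induction n with
  | zero =>
    intro S hl _
    have : S = [] := List.eq_nil_of_length_eq_zero (Nat.le_zero.mp hl)
    subst this; simp [pvGroup, PySem.List.sorted_eq_nil_iff]
  | succ n ih =>
    intro S hl h
    match S with
    | [] => simp [pvGroup, PySem.List.sorted_eq_nil_iff]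
    | x :: xs =>
      have hxall : ∀ y ∈ xs, x ≤ y := fun y hy => (List.pairwise_cons.mp h).1 y hy
      have hdsub : (xs.dropWhile (· == x)).Sublist xs := List.dropWhile_sublist _
      have hdpw : (xs.dropWhile (· == x)).Pairwise (· ≤ ·) :=
        ((List.pairwise_cons.mp h).2).sublist hdsub
      have htall : ∀ y ∈ xs.takeWhile (· == x), y = x := fun y hy => by
        have := List.mem_takeWhile_imp hy
        simpa using this
      have hxd : ∀ y ∈ xs.dropWhile (· == x), x < y := by
        intro y hy
        match hdd : xs.dropWhile (· == x), hy with
        | y0 :: ds, hy =>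
          have hne : xs.dropWhile (· == x) ≠ [] := by rw [hdd]; simp
          have hy0x := List.head_dropWhile_not ((· == x) : String → Bool) hne
          simp only [hdd, List.head_cons, beq_eq_false_iff_ne, ne_eq] at hy0x
          rw [hdd] at hdpw hdsub
          have hy0 : x < y0 :=
            lt_of_le_of_ne (hxall y0 (hdsub.subset (by simp))) (Ne.symm hy0x)
          rcases List.mem_cons.mp hy with rfl | hy'
          · exact hy0
          · exact lt_of_lt_of_le hy0 ((List.pairwise_cons.mp hdpw).1 y hy')
      have hsplit : xs.takeWhile (· == x) ++ xs.dropWhile (· == x) = xs :=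
        List.takeWhile_append_dropWhile
      have hcx : (x :: xs).count x = ((xs.takeWhile (· == x)).length + 1 : Nat) := by
        have hxs : xs.count x = (xs.takeWhile (· == x)).count x + (xs.dropWhile (· == x)).count x := by
          conv_lhs => rw [← hsplit]
          rw [List.count_append]
        rw [List.count_cons_self, hxs]
        have h1 : (xs.takeWhile (· == x)).count x = (xs.takeWhile (· == x)).length :=
          List.count_eq_length.mpr (fun y hy => by simp [htall y hy])
        have h2 : (xs.dropWhile (· == x)).count x = 0 :=
          List.count_eq_zero.mpr (fun hx => absurd (hxd x hx) (lt_irrefl x))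
        omega
      have hcw : ∀ w ∈ xs.dropWhile (· == x), (x :: xs).count w = (xs.dropWhile (· == x)).count w := by
        intro w hw
        have hwx : w ≠ x := fun he => absurd (he ▸ hxd w hw) (lt_irrefl x)
        have hxs : xs.count w = (xs.takeWhile (· == x)).count w + (xs.dropWhile (· == x)).count w := by
          conv_lhs => rw [← hsplit]
          rw [List.count_append]
        rw [List.count_cons_of_ne (by simpa [eq_comm] using hwx), hxs,
          List.count_eq_zero.mpr (fun hwt => hwx (htall w hwt)), Nat.zero_add]
      have hnodupd : (PySem.List.sorted (PySem.Set.ofList (xs.dropWhile (· == x))) (fun x => x) false).Nodup :=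
        ((PySem.List.sorted_perm (PySem.Set.ofList (xs.dropWhile (· == x))) (fun x => x) false).symm).nodup
          (PySem.Set.nodup_ofList _)
      have hxsorted : x ∉ PySem.List.sorted (PySem.Set.ofList (xs.dropWhile (· == x))) (fun x => x) false := by
        intro hx
        have hx' : x ∈ xs.dropWhile (· == x) := by
          have := (PySem.List.mem_sorted _ _ _ _).mp hx
          simpa [PySem.Set.mem_ofList] using this
        exact absurd (hxd x hx') (lt_irrefl x)
      have hperm : (x :: PySem.List.sorted (PySem.Set.ofList (xs.dropWhile (· == x))) (fun x => x) false).Perm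
          (PySem.Set.ofList (x :: xs)) := by
        rw [List.perm_ext_iff_of_nodup (List.nodup_cons.mpr ⟨hxsorted, hnodupd⟩)
          (PySem.Set.nodup_ofList _)]
        intro a
        simp only [List.mem_cons, PySem.List.mem_sorted, PySem.Set.mem_ofList]
        constructor
        · rintro (rfl | ha)
          · exact Or.inl rfl
          · exact Or.inr (hdsub.subset ha)
        · rintro (rfl | ha)
          · exact Or.inl rfl
          · rw [← hsplit] at ha
            rcases List.mem_append.mp ha with hat | had
            · exact Or.inl (htall a hat)
            · exact Or.inr had
      have hpwlt : (x :: PySem.List.sorted (PySem.Set.ofList (xs.dropWhile (· == x))) (fun x => x) false).Pairwise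
          (fun a b => a < b) := by
        refine List.pairwise_cons.mpr ⟨?_, ?_⟩
        · intro y hy
          refine hxd y ?_
          have := (PySem.List.mem_sorted _ _ _ _).mp hy
          simpa [PySem.Set.mem_ofList] using this
        · exact PySem.List.sorted_ofList_pairwise_lt _
      have hsorted_eq : PySem.List.sorted (PySem.Set.ofList (x :: xs)) (fun x => x) false
          = x :: PySem.List.sorted (PySem.Set.ofList (xs.dropWhile (· == x))) (fun x => x) false :=
        PySem.List.sorted_eq_of_perm_of_pairwise_lt _ _ _ hperm hpwlt
      have hih := ih (xs.dropWhile (· == x)) (by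
        have := List.length_dropWhile_le (fun z => z == x) xs
        simp only [List.length_cons] at hl
        omega) hdpw
      rw [show pvGroup (x :: xs)
          = (x, ((xs.takeWhile (· == x)).length + 1 : Int)) :: pvGroup (xs.dropWhile (· == x)) from by
        rw [pvGroup]]
      rw [hsorted_eq, List.map_cons, hcx, hih]
      congr 1
      apply List.map_congr_left
      intro w hw
      have hwd : w ∈ xs.dropWhile (· == x) := by
        have := (PySem.List.mem_sorted _ _ _ _).mp hw
        simpa [PySem.Set.mem_ofList] using this
      simp [hcw w hwd]

-- B's groupby pass, for an arbitrary list fed through sorted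
theorem pv_group_main (L : List String) :
    pvGroup (PySem.List.sorted L (fun x => x) false)
      = (PySem.List.sorted (PySem.Set.ofList L) (fun x => x) false).map
          (fun w => (w, (L.count w : Int))) := by
  have hpw : (PySem.List.sorted L (fun x => x) false).Pairwise (· ≤ ·) :=
    PySem.List.sorted_pairwise L (fun x => x)
  have hperm : (PySem.List.sorted L (fun x => x) false).Perm L := PySem.List.sorted_perm L _ _
  rw [pv_group_aux (PySem.List.sorted L (fun x => x) false).length _ le_rfl hpw]
  have hsets : (PySem.Set.ofList (PySem.List.sorted L (fun x => x) false)).Perm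
      (PySem.Set.ofList L) := by
    rw [List.perm_ext_iff_of_nodup (PySem.Set.nodup_ofList _) (PySem.Set.nodup_ofList _)]
    intro a
    simp [PySem.Set.mem_ofList, hperm.mem_iff]
  rw [PySem.List.sorted_eq_sorted_of_perm _ _ _ (fun a b hab => hab) hsets]
  apply List.map_congr_left
  intro w _
  rw [hperm.count_eq]

-- ===== VERDICT (by name: the statement is the Claim_ definition above) =====
theorem toLibrary_spec : Claim_equal_toLibrary := by
  intro list _
  show toLibrary list = toLibrary_alt list
  simp only [toLibrary, toLibrary_alt]
  rw [PySem.List.foldl_append_eq_flatMap, PySem.List.foldl_append_eq_flatMap]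
  simp only [List.nil_append, List.flatMap_map]
  set T := list.flatMap (fun row => row.map pvNorm) with hT
  set temp2 := PySem.List.sorted (PySem.Set.ofList T) (fun x => x) false with htemp2
  have hzip : temp2.zip (temp2.map (fun t =>
      (list.map (fun row => row.map pvNorm)).foldl
        (fun c row => row.foldl (fun c w => if w == t then c + 1 else c) c) (0 : Int)))
      = temp2.map (fun t => (t, (T.count t : Int))) := by
    rw [← List.map_prod_left_eq_zip]
    apply List.map_congr_left
    intro w _
    rw [pv_count_loop]
    simp [hT, List.flatMap_map]
  rw [hzip]
  have hnodup : temp2.Nodup :=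
    ((PySem.List.sorted_perm (PySem.Set.ofList T) (fun x => x) false).symm).nodup
      (PySem.Set.nodup_ofList _)
  have hitems : (PySem.Dict.ofList (temp2.map (fun t => (t, (T.count t : Int))))).items
      = temp2.map (fun t => (t, (T.count t : Int))) := by
    show (List.foldl (fun d (p : String × Int) => d.insert p.1 p.2) PySem.Dict.empty _).items = _
    rw [PySem.Dict.items_foldl_insert_fresh _ Prod.fst Prod.snd _
      (fun a _ => PySem.Dict.contains_empty _)
      (by simpa [List.map_map, Function.comp_def] using hnodup)]
    simp [PySem.Dict.empty]
  rw [hitems, pv_group_main]
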